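-- pv_equiv track=rewrite | github.com/reslp/LFS-cazy-comparative | bin/get_functional_for_cafe_families.py | extract_product
-- ===== SOURCE A (Python) =====
-- def extract_product(ann_str):
-- 	prodlist = []
-- 	for annot in ann_str.split(";"):
-- 		if "product" in annot:
-- 			for prod in annot.split(","):
-- 				if "product" in prod.split("=")[0]:
-- 					prodlist.append(prod.split("=")[-1])
-- 	return prodlist
-- ===== SOURCE B (Python) =====
-- def extract_product(ann_str):
--     return [tok.split("=")[-1]
--             for tok in ann_str.replace(";", ",").split(",")
--             if "product" in tok.split("=")[0]]
-- ===== Notes on version B (the rewrite author's own statement) =====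
-- stated objective: simpler
-- what changed: A's nested loops (split on semicolons, guard each segment for the substring, then split each segment on commas) are collapsed into one flat comprehension: replace semicolons by commas, split once on commas, and test each token directly; the outer segment guard is dropped because it is implied by the per-token key test.
import Mathlib
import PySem

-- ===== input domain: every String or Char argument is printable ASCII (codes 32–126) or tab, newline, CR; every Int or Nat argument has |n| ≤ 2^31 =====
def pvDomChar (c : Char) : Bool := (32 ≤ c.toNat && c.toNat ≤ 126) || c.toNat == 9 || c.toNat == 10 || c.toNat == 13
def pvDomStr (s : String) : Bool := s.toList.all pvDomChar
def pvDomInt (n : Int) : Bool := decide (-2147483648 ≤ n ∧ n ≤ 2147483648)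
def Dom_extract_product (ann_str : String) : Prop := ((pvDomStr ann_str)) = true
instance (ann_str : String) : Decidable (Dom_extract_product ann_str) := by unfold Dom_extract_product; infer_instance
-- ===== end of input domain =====

-- B replaces A's nested ';'-then-','-loops (with their outer 'product in annot' guard) by one flat pass over ann_str.replace(";", ",").split(","); same return value, simpler decomposition.

-- ===== PORT A =====
-- A, step for step: outer loop over ann_str.split(";") guarded by 'product in annot',
-- inner loop over annot.split(",") appending prod.split("=")[-1] when 'product' is in
-- prod.split("=")[0].  split with a nonempty separator is total (Chars.splitOn) and
-- never returns [], so the [0]/[-1] indexings always succeed: ported as pyGetD.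
def extract_product (ann_str : String) : List String :=
  ((PySem.Chars.splitOn ann_str.toList [';']).foldl
    (fun prodlist annot =>
      if PySem.Chars.isIn "product".toList annot then
        (PySem.Chars.splitOn annot [',']).foldl
          (fun prodlist prod =>
            if PySem.Chars.isIn "product".toList
                (PySem.List.pyGetD (PySem.Chars.splitOn prod ['=']) 0 []) then
              prodlist ++ [PySem.List.pyGetD (PySem.Chars.splitOn prod ['=']) (-1) []]
            else prodlist)
          prodlist
      else prodlist)
    []).map String.ofList

-- ===== PORT B =====
-- B, step for step: one comprehension over ann_str.replace(";", ",").split(",");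
-- keep tok if 'product' is in tok.split("=")[0], emit tok.split("=")[-1].
def extract_product_alt (ann_str : String) : List String :=
  ((PySem.Chars.splitOn (PySem.Chars.replace ann_str.toList [';'] [',']) [',']).filter
    (fun tok => PySem.Chars.isIn "product".toList
        (PySem.List.pyGetD (PySem.Chars.splitOn tok ['=']) 0 []))).map
    (fun tok => String.ofList (PySem.List.pyGetD (PySem.Chars.splitOn tok ['=']) (-1) []))

-- ===== PRECONDITION & SPEC =====
def Spec_extract_product (ann_str : String) (out : List String) : Prop := out = extract_product_alt ann_str
instance (ann_str : String) (out : List String) : Decidable (Spec_extract_product ann_str out) := by unfold Spec_extract_product; infer_instance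

-- ===== CLAIM (what is proved, stated in full; the proofs are below) =====
def Claim_equal_extract_product : Prop := ∀ (ann_str : String), Dom_extract_product ann_str → Spec_extract_product ann_str (extract_product ann_str)

-- ===== LEMMAS AND PROOFS =====

def pvSplit1 (d : Char) : List Char → List (List Char)
  | [] => [[]]
  | c :: t =>
    if c = d then [] :: pvSplit1 d t
    else
      match pvSplit1 d t with
      | [] => [[c]]
      | h :: r => (c :: h) :: r
theorem pvSplit1_ne_nil (d : Char) (s : List Char) : pvSplit1 d s ≠ [] := by
  cases s with
  | nil => simp [pvSplit1]
  | cons c t =>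
    simp only [pvSplit1]
    split_ifs
    · simp
    · cases pvSplit1 d t <;> simp
def pvConsHead (x : List Char) : List (List Char) → List (List Char)
  | [] => [x]
  | h :: r => (x ++ h) :: r
theorem pvSplitOn_go_eq (d : Char) (fuel : Nat) (l cur : List Char)
    (accs : List (List Char)) (h : l.length ≤ fuel) :
    PySem.Chars.splitOn.go [d] fuel l cur accs =
      accs.reverse ++ pvConsHead cur.reverse (pvSplit1 d l) := by
  induction fuel generalizing l cur accs with
  | zero =>
    cases l with
    | nil => simp [PySem.Chars.splitOn.go, pvSplit1, pvConsHead]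
    | cons c t => simp at h
  | succ n ih =>
    cases l with
    | nil => simp [PySem.Chars.splitOn.go, pvSplit1, pvConsHead]
    | cons c t =>
      rw [PySem.Chars.splitOn.go]
      by_cases hc : c = d
      · have hpre : [d].isPrefixOf (c :: t) = true := by
          simp [List.isPrefixOf, hc.symm]
        simp only [hpre, if_true]
        have hdrop : List.drop (([d] : List Char).length) (c :: t) = t := by simp
        rw [hdrop, ih t [] (cur.reverse :: accs) (by simp at h; omega)]
        simp only [pvSplit1, if_pos hc]
        cases hsp : pvSplit1 d t with
        | nil => exact absurd hsp (pvSplit1_ne_nil d t)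
        | cons hh r => simp [pvConsHead]
      · have : [d].isPrefixOf (c :: t) = false := by
          simp [List.isPrefixOf]; exact fun hh => absurd hh.symm hc
        simp only [this, Bool.false_eq_true, if_false]
        rw [ih t (c :: cur) accs (by simp at h; omega)]
        simp only [pvSplit1, if_neg hc]
        cases hsp : pvSplit1 d t with
        | nil => exact absurd hsp (pvSplit1_ne_nil d t)
        | cons hh r => simp [pvConsHead]

theorem pvSplitOn_single (d : Char) (s : List Char) :
    PySem.Chars.splitOn s [d] = pvSplit1 d s := by
  rw [PySem.Chars.splitOn, pvSplitOn_go_eq d (s.length + 1) s [] [] (by omega)]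
  cases hsp : pvSplit1 d s with
  | nil => exact absurd hsp (pvSplit1_ne_nil d s)
  | cons h r => simp [pvConsHead]

theorem pvReplace_go_eq (a b : Char) (fuel : Nat) (l acc : List Char) (h : l.length ≤ fuel) :
    PySem.Chars.replace.go [a] [b] fuel l acc =
      acc.reverse ++ l.map (fun c => if c = a then b else c) := by
  induction fuel generalizing l acc with
  | zero =>
    cases l with
    | nil => simp [PySem.Chars.replace.go]
    | cons c t => simp at h
  | succ n ih =>
    cases l with
    | nil => simp [PySem.Chars.replace.go]
    | cons c t =>
      rw [PySem.Chars.replace.go]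
      by_cases hc : c = a
      · have hpre : [a].isPrefixOf (c :: t) = true := by simp [List.isPrefixOf, hc.symm]
        simp only [hpre, if_true]
        have hdrop : List.drop (([a] : List Char).length) (c :: t) = t := by simp
        rw [hdrop, ih t ([b].reverse ++ acc) (by simp at h; omega)]
        simp [hc]
      · have hpre : [a].isPrefixOf (c :: t) = false := by
          simp [List.isPrefixOf]; exact fun hh => absurd hh.symm hc
        simp only [hpre, Bool.false_eq_true, if_false]
        rw [ih t (c :: acc) (by simp at h; omega)]
        simp [hc]

theorem pvReplace_single (a b : Char) (s : List Char) :
    PySem.Chars.replace s [a] [b] = s.map (fun c => if c = a then b else c) := by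
  rw [PySem.Chars.replace]
  simp only [List.isEmpty_cons, Bool.false_eq_true, if_false]
  exact pvReplace_go_eq a b s.length s [] (le_refl _)

theorem pvSplit1_map_flat (d1 d2 : Char) (s : List Char) :
    pvSplit1 d2 (s.map (fun c => if c = d1 then d2 else c)) =
      (pvSplit1 d1 s).flatMap (pvSplit1 d2) := by
  induction s with
  | nil => simp [pvSplit1]
  | cons c t ih =>
    by_cases h1 : c = d1
    · simp only [List.map_cons, if_pos h1, pvSplit1]
      rw [ih]
      simp [pvSplit1]
    · simp only [List.map_cons, pvSplit1, if_neg h1]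
      by_cases h2 : c = d2
      · simp only [if_pos h2]
        rw [ih]
        cases hsp : pvSplit1 d1 t with
        | nil => exact absurd hsp (pvSplit1_ne_nil d1 t)
        | cons hh r =>
          simp only [List.flatMap_cons]
          cases hsp2 : pvSplit1 d2 hh with
          | nil => exact absurd hsp2 (pvSplit1_ne_nil d2 hh)
          | cons hh2 r2 =>
            simp [pvSplit1, if_pos h2, hsp2]
      · simp only [if_neg h2]
        cases hsp : pvSplit1 d1 t with
        | nil => exact absurd hsp (pvSplit1_ne_nil d1 t)
        | cons hh r =>
          rw [hsp] at ih
          simp only [List.flatMap_cons] at ih ⊢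
          cases hsp2 : pvSplit1 d2 hh with
          | nil => exact absurd hsp2 (pvSplit1_ne_nil d2 hh)
          | cons hh2 r2 =>
            rw [hsp2] at ih
            simp only [pvSplit1, if_neg h2, hsp2, List.cons_append]
            cases hmv : pvSplit1 d2 (t.map (fun c => if c = d1 then d2 else c)) with
            | nil => exact absurd hmv (pvSplit1_ne_nil d2 _)
            | cons mh mr =>
              rw [hmv] at ih
              simp only [List.cons_append] at ih
              obtain ⟨hA, hB⟩ := List.cons_eq_cons.mp ih
              rw [hA, hB]

theorem pvFirst_prefix (d : Char) (s : List Char) :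
    ∀ hh r, pvSplit1 d s = hh :: r → hh <+: s := by
  induction s with
  | nil => intro hh r h; simp [pvSplit1] at h; simp [h.1]
  | cons c rest ih =>
    intro hh r h
    by_cases hc : c = d
    · simp only [pvSplit1, if_pos hc] at h
      obtain ⟨hA, hB⟩ := List.cons_eq_cons.mp h
      rw [← hA]
      exact List.nil_prefix
    · simp only [pvSplit1, if_neg hc] at h
      cases hsp : pvSplit1 d rest with
      | nil => exact absurd hsp (pvSplit1_ne_nil d rest)
      | cons h2 r2 =>
        rw [hsp] at h
        obtain ⟨hA, hB⟩ := List.cons_eq_cons.mp h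
        rw [← hA]
        exact List.cons_prefix_cons.mpr ⟨rfl, ih h2 r2 hsp⟩

theorem pvMem_pvSplit1_infix (d : Char) (s : List Char) :
    ∀ t ∈ pvSplit1 d s, t <:+: s := by
  induction s with
  | nil => intro t ht; simp [pvSplit1] at ht; simp [ht]
  | cons c rest ih =>
    intro t ht
    by_cases hc : c = d
    · simp only [pvSplit1, if_pos hc, List.mem_cons] at ht
      rcases ht with h | h
      · simp [h]
      · exact (ih t h).trans ((List.suffix_cons c rest).isInfix)
    · simp only [pvSplit1, if_neg hc] at ht
      cases hsp : pvSplit1 d rest with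
      | nil => exact absurd hsp (pvSplit1_ne_nil d rest)
      | cons hh r =>
        rw [hsp] at ht
        simp only [List.mem_cons] at ht
        rcases ht with h | h
        · subst h
          exact (List.cons_prefix_cons.mpr ⟨rfl, pvFirst_prefix d rest hh r hsp⟩).isInfix
        · exact (ih t (by rw [hsp]; simp [h])).trans ((List.suffix_cons c rest).isInfix)

theorem pvSplit1_head_prefix (d : Char) (s : List Char) :
    PySem.List.pyGetD (pvSplit1 d s) 0 [] <+: s := by
  cases hsp : pvSplit1 d s with
  | nil => exact absurd hsp (pvSplit1_ne_nil d s)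
  | cons hh r =>
    have : PySem.List.pyGetD (hh :: r) 0 [] = hh := by
      simp [PySem.List.pyGetD, PySem.List.pyGet?, PySem.List.pyIdx?]
    rw [this]
    exact pvFirst_prefix d s hh r hsp

theorem pvGuard_redundant (annot tok : List Char)
    (htok : tok ∈ pvSplit1 ',' annot)
    (hg : PySem.Chars.isIn "product".toList annot = false) :
    PySem.Chars.isIn "product".toList (PySem.List.pyGetD (pvSplit1 '=' tok) 0 []) = false := by
  rw [PySem.Chars.isIn_eq_false_iff] at hg ⊢
  intro hinf
  exact hg (hinf.trans ((pvSplit1_head_prefix '=' tok).isInfix.trans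
    (pvMem_pvSplit1_infix ',' annot tok htok)))

theorem pv_main (s : String) : extract_product s = extract_product_alt s := by
  unfold extract_product extract_product_alt
  simp only [pvSplitOn_single, pvReplace_single]
  -- name the token test and value
  set p : List Char → Bool := fun tok => PySem.Chars.isIn "product".toList
      (PySem.List.pyGetD (pvSplit1 '=' tok) 0 []) with hp
  set f : List Char → List Char := fun tok => PySem.List.pyGetD (pvSplit1 '=' tok) (-1) [] with hf
  -- inner loop = filter/map append
  have step : ∀ (acc : List (List Char)) (annot : List Char),
      (if PySem.Chars.isIn "product".toList annot then
        (pvSplit1 ',' annot).foldl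
          (fun acc tok => if p tok then acc ++ [f tok] else acc) acc
      else acc) = acc ++ ((pvSplit1 ',' annot).filter p).map f := by
    intro acc annot
    by_cases hg : PySem.Chars.isIn "product".toList annot
    · rw [if_pos hg, PySem.List.foldl_append_if]
    · rw [if_neg hg]
      have : (pvSplit1 ',' annot).filter p = [] := by
        apply List.filter_eq_nil_iff.mpr
        intro tok htok
        have hred := pvGuard_redundant annot tok htok (Bool.eq_false_iff.mpr hg)
        simp only [hp]
        simpa using hred
      rw [this]; simp
  rw [PySem.List.foldl_congr_mem _ _ _ _ (fun acc x _ => step acc x),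
    PySem.List.foldl_append_eq_flatMap (fun annot => ((pvSplit1 ',' annot).filter p).map f)]
  rw [pvSplit1_map_flat ';' ',']
  simp [List.filter_flatMap, List.map_flatMap, List.map_map, hf, Function.comp_def]

-- ===== VERDICT (by name: the statement is the Claim_ definition above) =====
theorem extract_product_spec : Claim_equal_extract_product := by
  intro ann_str _
  unfold Spec_extract_product
  exact pv_main ann_str
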